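-- pv_equiv track=rewrite | github.com/tomdif/jt-gravity-from-convex-subsets | scripts/18_action_entropy_decomposition.py | enumerate_cc_varwidth
-- ===== SOURCE A (Python) =====
-- def enumerate_cc_varwidth(row_widths):
--     n_rows = len(row_widths)
--     cells = [(r,c) for r in range(n_rows) for c in range(row_widths[r])]
--     n = len(cells); cs = set(cells); results = []
--     for bits in range(1 << n):
--         S = frozenset(cells[k] for k in range(n) if bits & (1 << k))
--         ok = True
--         for a in S:
--             if not ok: break
--             for b in S:
--                 if not ok: break
--                 if a[0]<=b[0] and a[1]<=b[1]:
--                     for r in range(a[0],b[0]+1):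
--                         for c in range(a[1],b[1]+1):
--                             if (r,c) in cs and (r,c) not in S: ok=False; break
--                         if not ok: break
--         if ok:
--             links = sum(1 for (r,c) in S if (r+1,c) in S) + \
--                     sum(1 for (r,c) in S if (r,c+1) in S)
--             results.append((len(S) - links, len(S), S))
--     return results
-- ===== SOURCE B (Python) =====
-- def enumerate_cc_varwidth(row_widths):
--     # Same enumeration, but convexity is tested per EXCLUDED cell against
--     # precomputed upper-left / lower-right dominance bitmasks: O(2^n * n)
--     # instead of A's nested pair-and-rectangle scan.
--     n_rows = len(row_widths)
--     cells = [(r, c) for r in range(n_rows) for c in range(row_widths[r])]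
--     n = len(cells)
--     UL = []  # UL[k]: bitmask of cells weakly upper-left of cells[k]
--     LR = []  # LR[k]: bitmask of cells weakly lower-right of cells[k]
--     for (r, c) in cells:
--         mu = 0
--         ml = 0
--         for j, (ar, ac) in enumerate(cells):
--             if ar <= r and ac <= c:
--                 mu |= 1 << j
--             if ar >= r and ac >= c:
--                 ml |= 1 << j
--         UL.append(mu)
--         LR.append(ml)
--     results = []
--     for bits in range(1 << n):
--         ok = True
--         for k in range(n):
--             if not (bits >> k) & 1 and (bits & UL[k]) and (bits & LR[k]):
--                 ok = False
--                 break
--         if ok: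
--             S = [cells[k] for k in range(n) if (bits >> k) & 1]
--             sset = frozenset(S)
--             links = sum(1 for (r, c) in S if (r + 1, c) in sset) + \
--                     sum(1 for (r, c) in S if (r, c + 1) in sset)
--             results.append((len(S) - links, len(S), sset))
--     return results
-- ===== Notes on version B (the rewrite author's own statement) =====
-- stated objective: faster
-- what changed: A tests each subset's convexity by scanning all ordered pairs of member cells and every grid cell in their spanning rectangle; B precomputes per-cell upper-left and lower-right dominance bitmasks once and tests each subset in O(n) by checking, for every excluded cell, whether the subset meets both of its dominance masks.
import Mathlib
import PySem

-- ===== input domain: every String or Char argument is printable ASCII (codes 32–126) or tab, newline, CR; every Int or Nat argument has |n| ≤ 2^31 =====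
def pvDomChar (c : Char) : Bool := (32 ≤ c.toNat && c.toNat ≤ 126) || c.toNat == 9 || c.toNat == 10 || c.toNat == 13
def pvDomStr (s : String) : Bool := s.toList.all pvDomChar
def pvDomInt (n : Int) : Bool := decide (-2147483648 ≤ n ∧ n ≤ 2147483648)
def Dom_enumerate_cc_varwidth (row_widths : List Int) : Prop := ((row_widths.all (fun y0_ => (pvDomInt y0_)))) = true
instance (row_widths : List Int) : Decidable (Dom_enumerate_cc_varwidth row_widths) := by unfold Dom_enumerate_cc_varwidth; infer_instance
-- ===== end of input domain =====

-- B replaces A's per-subset pair-and-rectangle convexity scan by a per-excluded-cell test against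
-- precomputed upper-left / lower-right dominance bitmasks (O(n) instead of O(n^2 * area) per subset).

-- ===== PORT A =====
-- cells = [(r,c) for r in range(n_rows) for c in range(row_widths[r])]
-- (range(w) for an Int w is empty when w ≤ 0, so `.toNat` is exact here; r < len always, so getD is exact)
def pvCellsA (row_widths : List Int) : List (Int × Int) :=
  (List.range row_widths.length).flatMap (fun r =>
    (List.range (row_widths.getD r 0).toNat).map (fun c => (Int.ofNat r, Int.ofNat c)))

-- literal port of A; bits ≥ 0 so Python's `bits & (1 << k)` truthiness is `bits.testBit k`;
-- the flag-and-break pair/rectangle scan computes exactly "no violating (a,b,cell) triple", i.e. `.all`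
def enumerate_cc_varwidth (row_widths : List Int) : List (Int × Int × (List (Int × Int))) :=
  let cells := pvCellsA row_widths
  let n := cells.length
  let cs : PySem.Set (Int × Int) := PySem.Set.ofList cells
  (List.range (2 ^ n)).foldl (fun results bits =>
    let S : PySem.Set (Int × Int) :=
      PySem.Set.ofList ((List.range n).filterMap (fun k => if bits.testBit k then cells[k]? else none))
    let ok := S.all (fun a => S.all (fun b =>
      if a.1 ≤ b.1 ∧ a.2 ≤ b.2 then
        (PySem.List.pyRange a.1 (b.1 + 1) 1).all (fun r =>
          (PySem.List.pyRange a.2 (b.2 + 1) 1).all (fun c =>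
            !(PySem.Set.contains cs (r, c) && !(PySem.Set.contains S (r, c)))))
      else true))
    if ok then
      let links : Int := (S.countP (fun p => PySem.Set.contains S (p.1 + 1, p.2)) : Int)
                       + (S.countP (fun p => PySem.Set.contains S (p.1, p.2 + 1)) : Int)
      results ++ [((S.length : Int) - links, (S.length : Int), S)]
    else results) []

-- ===== PORT B =====
def pvCellsB (row_widths : List Int) : List (Int × Int) :=
  (List.range row_widths.length).flatMap (fun r =>
    (List.range (row_widths.getD r 0).toNat).map (fun c => (Int.ofNat r, Int.ofNat c)))

-- the mask-building loop of Source B: for each cell p one pass over enumerate(cells) building (mu, ml)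
-- (enumerate indices are ≥ 0, rendered as the Nat indices of zipIdx)
def pvMasks (cells : List (Int × Int)) : List (Nat × Nat) :=
  cells.map (fun p =>
    cells.zipIdx.foldl (fun (m : Nat × Nat) qj =>
      ((if qj.1.1 ≤ p.1 ∧ qj.1.2 ≤ p.2 then m.1 ||| (1 <<< qj.2) else m.1),
       (if qj.1.1 ≥ p.1 ∧ qj.1.2 ≥ p.2 then m.2 ||| (1 <<< qj.2) else m.2))) (0, 0))

-- literal port of Source B: ok = no excluded cell k with S ∩ UL[k] and S ∩ LR[k] both nonempty
def enumerate_cc_varwidth_alt (row_widths : List Int) : List (Int × Int × (List (Int × Int))) :=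
  let cells := pvCellsB row_widths
  let n := cells.length
  let masks := pvMasks cells
  let UL := masks.map (·.1)
  let LR := masks.map (·.2)
  (List.range (2 ^ n)).foldl (fun results bits =>
    let ok := (List.range n).all (fun k =>
      !(!bits.testBit k && (bits &&& UL.getD k 0 != 0) && (bits &&& LR.getD k 0 != 0)))
    if ok then
      let S := (List.range n).filterMap (fun k => if bits.testBit k then cells[k]? else none)
      let sset : PySem.Set (Int × Int) := PySem.Set.ofList S
      let links : Int := (S.countP (fun p => PySem.Set.contains sset (p.1 + 1, p.2)) : Int)
                       + (S.countP (fun p => PySem.Set.contains sset (p.1, p.2 + 1)) : Int)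
      results ++ [((S.length : Int) - links, (S.length : Int), sset)]
    else results) []

-- ===== PRECONDITION & SPEC =====
def Spec_enumerate_cc_varwidth (row_widths : List Int) (out : List (Int × Int × (List (Int × Int)))) : Prop := out = enumerate_cc_varwidth_alt row_widths
instance (row_widths : List Int) (out : List (Int × Int × (List (Int × Int)))) : Decidable (Spec_enumerate_cc_varwidth row_widths out) := by unfold Spec_enumerate_cc_varwidth; infer_instance

-- ===== CLAIM (what is proved, stated in full; the proofs are below) =====
def Claim_equal_enumerate_cc_varwidth : Prop := ∀ (row_widths : List Int), Dom_enumerate_cc_varwidth row_widths → Spec_enumerate_cc_varwidth row_widths (enumerate_cc_varwidth row_widths)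

-- ===== LEMMAS AND PROOFS =====

-- the cell list is duplicate-free
theorem pvCells_nodup (row_widths : List Int) : (pvCellsA row_widths).Nodup := by
  unfold pvCellsA
  rw [List.nodup_flatMap]
  constructor
  · intro r _
    have hinj : Function.Injective (fun c : Nat => (Int.ofNat r, Int.ofNat c)) := by
      intro a b h
      simpa [Int.ofNat_eq_natCast] using congrArg Prod.snd h
    exact List.Nodup.map hinj List.nodup_range
  · refine List.Pairwise.imp ?_ (List.pairwise_lt_range)
    intro a b hab x hx hx'
    simp only [List.mem_map] at hx hx'
    obtain ⟨c1, -, rfl⟩ := hx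
    obtain ⟨c2, -, h2⟩ := hx'
    have := congrArg Prod.fst h2
    simp [Int.ofNat_eq_natCast] at this
    omega

-- the selected sublist (cells[k] for selected k) is a sublist of cells
theorem pvSel_sublist {α : Type} (xs : List α) (p : Nat → Bool) (m : Nat) (hm : m ≤ xs.length) :
    ((List.range m).filterMap (fun k => if p k then xs[k]? else none)).Sublist (xs.take m) := by
  induction m with
  | zero => simp
  | succ m ih =>
    rw [List.range_succ, List.filterMap_append,
        List.take_add_one, List.getElem?_eq_getElem (by omega)]
    refine List.Sublist.append (ih (by omega)) ?_
    by_cases hp : p m = true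
    · simp [hp, List.getElem?_eq_getElem (show m < xs.length by omega)]
    · simp [hp]

theorem pvSel_nodup {α : Type} (xs : List α) (hxs : xs.Nodup) (p : Nat → Bool) :
    ((List.range xs.length).filterMap (fun k => if p k then xs[k]? else none)).Nodup := by
  have h := pvSel_sublist xs p xs.length le_rfl
  rw [List.take_length] at h
  exact h.nodup hxs

theorem pvSel_mem {α : Type} (xs : List α) (p : Nat → Bool) (x : α) :
    x ∈ (List.range xs.length).filterMap (fun k => if p k then xs[k]? else none) ↔
      ∃ k, ∃ h : k < xs.length, p k = true ∧ xs[k] = x := by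
  simp only [List.mem_filterMap, List.mem_range]
  constructor
  · rintro ⟨k, hk, h⟩
    by_cases hp : p k = true
    · rw [if_pos hp, List.getElem?_eq_getElem hk] at h
      exact ⟨k, hk, hp, by simpa using h⟩
    · simp [hp] at h
  · rintro ⟨k, hk, hp, rfl⟩
    exact ⟨k, hk, by simp [hp, List.getElem?_eq_getElem hk]⟩

-- testBit of the pair-mask foldl
theorem pvMaskFold_testBit (xs : List (Int × Int)) (p : Int × Int) (o : Nat) (m : Nat × Nat) (i : Nat) :
    (((xs.zipIdx o).foldl (fun (m : Nat × Nat) qj =>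
      ((if qj.1.1 ≤ p.1 ∧ qj.1.2 ≤ p.2 then m.1 ||| (1 <<< qj.2) else m.1),
       (if qj.1.1 ≥ p.1 ∧ qj.1.2 ≥ p.2 then m.2 ||| (1 <<< qj.2) else m.2))) m).1.testBit i = true ↔
        m.1.testBit i = true ∨ (o ≤ i ∧ i - o < xs.length ∧
          (xs.getD (i - o) (0, 0)).1 ≤ p.1 ∧ (xs.getD (i - o) (0, 0)).2 ≤ p.2)) ∧
    (((xs.zipIdx o).foldl (fun (m : Nat × Nat) qj =>
      ((if qj.1.1 ≤ p.1 ∧ qj.1.2 ≤ p.2 then m.1 ||| (1 <<< qj.2) else m.1),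
       (if qj.1.1 ≥ p.1 ∧ qj.1.2 ≥ p.2 then m.2 ||| (1 <<< qj.2) else m.2))) m).2.testBit i = true ↔
        m.2.testBit i = true ∨ (o ≤ i ∧ i - o < xs.length ∧
          (xs.getD (i - o) (0, 0)).1 ≥ p.1 ∧ (xs.getD (i - o) (0, 0)).2 ≥ p.2)) := by
  induction xs generalizing o m with
  | nil => simp
  | cons x xs ih =>
    rw [List.zipIdx_cons]
    simp only [List.foldl_cons]
    have h1 : ∀ (b : Nat) (P : Prop) [Decidable P],
        ((if P then b ||| (1 <<< o) else b).testBit i = true ↔ b.testBit i = true ∨ (P ∧ o = i)) := by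
      intro b P hP
      by_cases h : P <;>
        simp [h, Nat.testBit_or, Nat.shiftLeft_eq, Nat.testBit_two_pow]
    obtain ⟨ihl, ihr⟩ := ih (o + 1) (((if x.1 ≤ p.1 ∧ x.2 ≤ p.2 then m.1 ||| (1 <<< o) else m.1),
       (if x.1 ≥ p.1 ∧ x.2 ≥ p.2 then m.2 ||| (1 <<< o) else m.2)))
    constructor
    all_goals
      first
        | rw [ihl, h1]
        | rw [ihr, h1]
    all_goals
      by_cases hio : i = o
      · subst hio
        simp only [Nat.sub_self, List.getD_cons_zero, List.length_cons]
        constructor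
        · rintro ((hb | ⟨hc, -⟩) | ⟨ho, -, -⟩)
          · exact Or.inl hb
          · exact Or.inr ⟨le_rfl, by omega, hc.1, hc.2⟩
          · omega
        · rintro (hb | ⟨-, -, hc1, hc2⟩)
          · exact Or.inl (Or.inl hb)
          · exact Or.inl (Or.inr ⟨⟨hc1, hc2⟩, by trivial⟩)
      · by_cases hlt : i < o
        · have e1 : ¬ (o ≤ i) := by omega
          have e2 : ¬ (o + 1 ≤ i) := by omega
          have e4 : ¬ (o = i) := by omega
          simp [e1, e2, e4]
        · have e3 : i - o = (i - (o + 1)) + 1 := by omega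
          rw [e3, List.getD_cons_succ]
          simp only [List.length_cons]
          constructor
          · rintro ((hb | ⟨-, h0⟩) | ⟨ho, hlen, hc⟩)
            · exact Or.inl hb
            · omega
            · exact Or.inr ⟨by omega, by omega, hc⟩
          · rintro (hb | ⟨ho, hlen, hc⟩)
            · exact Or.inl (Or.inl hb)
            · exact Or.inr ⟨by omega, by omega, hc⟩

theorem pvAnd_ne_zero (bits u : Nat) :
    ((bits &&& u) ≠ 0) ↔ ∃ i, bits.testBit i = true ∧ u.testBit i = true := by
  constructor
  · intro h
    obtain ⟨i, hi⟩ := Nat.exists_testBit_of_ne_zero h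
    rw [Nat.testBit_and, Bool.and_eq_true] at hi
    exact ⟨i, hi⟩
  · rintro ⟨i, h1, h2⟩ h0
    have := congrArg (Nat.testBit · i) h0
    simp [Nat.testBit_and, h1, h2] at this

-- bits ∩ UL[k] nonempty ↔ some selected cell is weakly upper-left of cells[k] (and the LR twin)
theorem pvMask_char (cells : List (Int × Int)) (bits : Nat) (k : Nat) (hk : k < cells.length) :
    ((bits &&& ((pvMasks cells).map (·.1)).getD k 0 ≠ 0) ↔
      ∃ j, ∃ hj : j < cells.length, bits.testBit j = true ∧
        cells[j].1 ≤ cells[k].1 ∧ cells[j].2 ≤ cells[k].2) ∧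
    ((bits &&& ((pvMasks cells).map (·.2)).getD k 0 ≠ 0) ↔
      ∃ j, ∃ hj : j < cells.length, bits.testBit j = true ∧
        cells[j].1 ≥ cells[k].1 ∧ cells[j].2 ≥ cells[k].2) := by
  have hlen : (((pvMasks cells).map (·.1)).length = cells.length) := by simp [pvMasks]
  have hlen2 : (((pvMasks cells).map (·.2)).length = cells.length) := by simp [pvMasks]
  have hUL : ((pvMasks cells).map (·.1)).getD k 0 =
      (cells.zipIdx.foldl (fun (m : Nat × Nat) qj =>
        ((if qj.1.1 ≤ cells[k].1 ∧ qj.1.2 ≤ cells[k].2 then m.1 ||| (1 <<< qj.2) else m.1),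
         (if qj.1.1 ≥ cells[k].1 ∧ qj.1.2 ≥ cells[k].2 then m.2 ||| (1 <<< qj.2) else m.2))) (0, 0)).1 := by
    rw [List.getD_eq_getElem _ _ (by omega)]
    simp [pvMasks]
  have hLR : ((pvMasks cells).map (·.2)).getD k 0 =
      (cells.zipIdx.foldl (fun (m : Nat × Nat) qj =>
        ((if qj.1.1 ≤ cells[k].1 ∧ qj.1.2 ≤ cells[k].2 then m.1 ||| (1 <<< qj.2) else m.1),
         (if qj.1.1 ≥ cells[k].1 ∧ qj.1.2 ≥ cells[k].2 then m.2 ||| (1 <<< qj.2) else m.2))) (0, 0)).2 := by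
    rw [List.getD_eq_getElem _ _ (by omega)]
    simp [pvMasks]
  constructor
  · rw [hUL, pvAnd_ne_zero]
    constructor
    · rintro ⟨i, hb, ht⟩
      have := ((pvMaskFold_testBit cells (cells[k]) 0 (0, 0) i).1).mp ht
      simp only [Nat.zero_testBit, Nat.sub_zero, Nat.zero_le, true_and] at this
      rcases this with h | ⟨hi, h1, h2⟩
      · exact absurd h (by simp)
      · exact ⟨i, hi, hb, by rwa [List.getD_eq_getElem _ _ hi] at h1,
          by rwa [List.getD_eq_getElem _ _ hi] at h2⟩
    · rintro ⟨j, hj, hb, h1, h2⟩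
      refine ⟨j, hb, ((pvMaskFold_testBit cells (cells[k]) 0 (0, 0) j).1).mpr ?_⟩
      exact Or.inr ⟨by omega, by simpa using hj,
        by rwa [List.getD_eq_getElem _ _ (by simpa using hj)],
        by rwa [List.getD_eq_getElem _ _ (by simpa using hj)]⟩
  · rw [hLR, pvAnd_ne_zero]
    constructor
    · rintro ⟨i, hb, ht⟩
      have := ((pvMaskFold_testBit cells (cells[k]) 0 (0, 0) i).2).mp ht
      simp only [Nat.zero_testBit, Nat.sub_zero, Nat.zero_le, true_and] at this
      rcases this with h | ⟨hi, h1, h2⟩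
      · exact absurd h (by simp)
      · exact ⟨i, hi, hb, by rwa [List.getD_eq_getElem _ _ hi] at h1,
          by rwa [List.getD_eq_getElem _ _ hi] at h2⟩
    · rintro ⟨j, hj, hb, h1, h2⟩
      refine ⟨j, hb, ((pvMaskFold_testBit cells (cells[k]) 0 (0, 0) j).2).mpr ?_⟩
      exact Or.inr ⟨by omega, by simpa using hj,
        by rwa [List.getD_eq_getElem _ _ (by simpa using hj)],
        by rwa [List.getD_eq_getElem _ _ (by simpa using hj)]⟩

-- A's pair-and-rectangle convexity test equals B's excluded-cell dominance test on every subset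
theorem pvOk_eq (cells : List (Int × Int)) (hnd : cells.Nodup) (bits : Nat) :
    ((PySem.Set.ofList ((List.range cells.length).filterMap
        (fun k => if bits.testBit k then cells[k]? else none))).all (fun a =>
      (PySem.Set.ofList ((List.range cells.length).filterMap
        (fun k => if bits.testBit k then cells[k]? else none))).all (fun b =>
       if a.1 ≤ b.1 ∧ a.2 ≤ b.2 then
         (PySem.List.pyRange a.1 (b.1 + 1) 1).all (fun r =>
           (PySem.List.pyRange a.2 (b.2 + 1) 1).all (fun c =>
             !(PySem.Set.contains (PySem.Set.ofList cells) (r, c) &&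
               !(PySem.Set.contains (PySem.Set.ofList ((List.range cells.length).filterMap
                   (fun k => if bits.testBit k then cells[k]? else none))) (r, c)))))
       else true)))
    = ((List.range cells.length).all (fun k =>
         !(!bits.testBit k && (bits &&& ((pvMasks cells).map (·.1)).getD k 0 != 0)
            && (bits &&& ((pvMasks cells).map (·.2)).getD k 0 != 0)))) := by
  rw [Bool.eq_iff_iff]
  have hL := PySem.Set.ofList_eq_self_of_nodup _
    (pvSel_nodup cells hnd (fun k => bits.testBit k))
  rw [hL]
  simp only [List.all_eq_true, ite_eq_right_iff, PySem.List.mem_pyRange_one,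
    Bool.and_eq_false_iff, List.mem_range,
    PySem.Set.contains_eq_listContains, List.contains_eq_mem, decide_eq_true_eq,
    PySem.Set.mem_ofList, Bool.not_eq_eq_eq_not, Bool.not_true, Bool.not_false, decide_eq_false_iff_not, bne_eq_false_iff_eq,
    decide_eq_true_eq]
  constructor
  · intro h k hk
    by_cases hbk : bits.testBit k = true
    · exact Or.inl (Or.inl hbk)
    · by_cases hUL : bits &&& ((pvMasks cells).map (·.1)).getD k 0 = 0
      · exact Or.inl (Or.inr hUL)
      · by_cases hLR : bits &&& ((pvMasks cells).map (·.2)).getD k 0 = 0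
        · exact Or.inr hLR
        · exfalso
          obtain ⟨j1, hj1, hb1, hle1, hle2⟩ := ((pvMask_char cells bits k hk).1).mp hUL
          obtain ⟨j2, hj2, hb2, hge1, hge2⟩ := ((pvMask_char cells bits k hk).2).mp hLR
          have ha : cells[j1] ∈ (List.range cells.length).filterMap
              (fun k => if bits.testBit k then cells[k]? else none) :=
            (pvSel_mem cells _ _).mpr ⟨j1, hj1, hb1, rfl⟩
          have hb : cells[j2] ∈ (List.range cells.length).filterMap
              (fun k => if bits.testBit k then cells[k]? else none) :=
            (pvSel_mem cells _ _).mpr ⟨j2, hj2, hb2, rfl⟩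
          have := h _ ha _ hb ⟨by omega, by omega⟩ (cells[k].1) ⟨hle1, by omega⟩
            (cells[k].2) ⟨hle2, by omega⟩
          rcases this with hnotmem | hmem
          · exact hnotmem (by rw [Prod.mk.eta]; exact List.getElem_mem hk)
          · obtain ⟨k', hk', hbk', hkeq⟩ := (pvSel_mem cells _ _).mp (by simpa using hmem)
            have hkk : k' = k := (List.Nodup.getElem_inj_iff hnd).mp hkeq
            exact hbk (hkk ▸ hbk')
  · intro h a ha b hb hab x2 hx2 x3 hx3
    by_cases hmem : (x2, x3) ∈ cells
    · obtain ⟨k, hk, hck⟩ := List.mem_iff_getElem.mp hmem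
      rcases h k hk with (hbk | hUL) | hLR
      · exact Or.inr ((pvSel_mem cells _ _).mpr ⟨k, hk, hbk, hck⟩)
      · obtain ⟨j, hj, hbj, hja⟩ := (pvSel_mem cells _ _).mp ha
        exact absurd hUL (((pvMask_char cells bits k hk).1).mpr
          ⟨j, hj, hbj, by rw [hja, hck]; exact hx2.1, by rw [hja, hck]; exact hx3.1⟩)
      · obtain ⟨j, hj, hbj, hjb⟩ := (pvSel_mem cells _ _).mp hb
        exact absurd hLR (((pvMask_char cells bits k hk).2).mpr
          ⟨j, hj, hbj, by rw [hjb, hck]; simp; omega, by rw [hjb, hck]; simp; omega⟩)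
    · exact Or.inl hmem

-- the two ports agree: same subset enumeration, equal convexity test, identical payloads
theorem pv_step_eq (row_widths : List Int) :
    enumerate_cc_varwidth row_widths = enumerate_cc_varwidth_alt row_widths := by
  unfold enumerate_cc_varwidth enumerate_cc_varwidth_alt
  have hc : pvCellsB row_widths = pvCellsA row_widths := rfl
  rw [hc]
  dsimp only
  congr 1
  funext results bits
  have hOk := pvOk_eq (pvCellsA row_widths) (pvCells_nodup row_widths) bits
  rw [hOk]
  have hL := PySem.Set.ofList_eq_self_of_nodup _
    (pvSel_nodup (pvCellsA row_widths) (pvCells_nodup row_widths) (fun k => bits.testBit k))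
  rw [hL]

-- ===== VERDICT (by name: the statement is the Claim_ definition above) =====
theorem enumerate_cc_varwidth_spec : Claim_equal_enumerate_cc_varwidth := by
  intro row_widths _
  exact pv_step_eq row_widths
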